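-- pv_equiv track=rewrite | github.com/qlalfdmlghk1/CodingTest_Python | 프로그래머스/1/389478. 택배 상자 꺼내기/택배 상자 꺼내기.py | solution
-- ===== SOURCE A (Python) =====
-- def solution(n, w, num):
--     target_width = num % w   # 0
--     target_hight = num // w + 1  # 2
--     if target_width == 0 :
--         target_hight -= 1
--
--     add_width = n % w  # 1
--     total_hight = n // w
--
--     layer = [total_hight for _ in range(w)]
--     if add_width > 0 :
--         if total_hight % 2 == 0 :
--             idx = 0
--             for i in range(add_width) :
--                 layer[idx] += 1
--                 idx += 1
--         else :
--             idx = w - 1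
--             for i in range(add_width):
--                 layer[idx] += 1
--                 idx -= 1
--
--     if target_hight % 2 == 0 :
--         if target_width == 0 :
--             target_width = w
--         target_idx = w - target_width
--     else :
--         if target_width == 0 :
--             target_width = w
--         target_idx = target_width - 1
--     return layer[target_idx] - target_hight + 1
-- ===== SOURCE B (Python) =====
-- def solution(n, w, num):
--     # O(1): compute the target column and its stack height arithmetically.
--     th = -(-num // w)                    # ceil(num / w): the target row (1-based)
--     tw = num % w or w                    # position within the row, 1..w
--     idx = (w - tw) if th % 2 == 0 else (tw - 1)   # zigzag column index
--     base, r = divmod(n, w)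
--     bump = 1 if (idx < r if base % 2 == 0 else idx >= w - r) else 0
--     return base + bump - th + 1
-- ===== Notes on version B (the rewrite author's own statement) =====
-- stated objective: faster
-- what changed: B replaces A's O(w) construction of the whole per-column height list (built with two index-walking loops) by a closed-form O(1) computation of the one target column's height via ceiling/floor division and a parity test.
import Mathlib
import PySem

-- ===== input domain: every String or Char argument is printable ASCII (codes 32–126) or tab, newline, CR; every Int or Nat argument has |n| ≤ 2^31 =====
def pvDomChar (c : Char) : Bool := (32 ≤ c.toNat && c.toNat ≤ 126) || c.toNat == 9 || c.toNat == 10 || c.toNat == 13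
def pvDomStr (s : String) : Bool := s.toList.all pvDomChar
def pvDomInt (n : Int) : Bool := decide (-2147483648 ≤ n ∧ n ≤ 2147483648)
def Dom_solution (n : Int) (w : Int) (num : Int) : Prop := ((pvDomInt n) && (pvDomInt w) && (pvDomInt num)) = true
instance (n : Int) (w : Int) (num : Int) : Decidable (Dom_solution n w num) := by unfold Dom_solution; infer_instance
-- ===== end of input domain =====

-- B computes the one target column's height in O(1) by closed-form arithmetic instead of
-- building A's O(w) per-column height list with index-walking loops.

-- ===== PORT A =====
-- literal transliteration of A: builds the zigzag height list `layer`, then indexes it.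
-- `layer[idx] += 1` is ported exactly as PySem.List.pySetD/pyGetD (in-range under Pre_).
def solution (n : Int) (w : Int) (num : Int) : Int :=
  let target_width := PySem.Int.mod num w
  let target_hight := PySem.Int.floordiv num w + 1
  let target_hight := if target_width = 0 then target_hight - 1 else target_hight
  let add_width := PySem.Int.mod n w
  let total_hight := PySem.Int.floordiv n w
  let layer : List Int := (PySem.List.pyRange 0 w 1).map (fun _ => total_hight)
  let layer :=
    if 0 < add_width then
      if PySem.Int.mod total_hight 2 = 0 then
        ((PySem.List.pyRange 0 add_width 1).foldl
          (fun (s : List Int × Int) _ =>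
            (PySem.List.pySetD s.1 s.2 (PySem.List.pyGetD s.1 s.2 0 + 1), s.2 + 1))
          (layer, 0)).1
      else
        ((PySem.List.pyRange 0 add_width 1).foldl
          (fun (s : List Int × Int) _ =>
            (PySem.List.pySetD s.1 s.2 (PySem.List.pyGetD s.1 s.2 0 + 1), s.2 - 1))
          (layer, w - 1)).1
    else layer
  let target_idx :=
    if PySem.Int.mod target_hight 2 = 0 then
      let tw := if target_width = 0 then w else target_width
      w - tw
    else
      let tw := if target_width = 0 then w else target_width
      tw - 1
  PySem.List.pyGetD layer target_idx 0 - target_hight + 1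

-- ===== PORT B =====
-- literal transliteration of Source B
def solution_alt (n : Int) (w : Int) (num : Int) : Int :=
  let th := -(PySem.Int.floordiv (-num) w)
  let tw := if PySem.Int.mod num w = 0 then w else PySem.Int.mod num w
  let idx := if PySem.Int.mod th 2 = 0 then w - tw else tw - 1
  let base := PySem.Int.floordiv n w
  let r := PySem.Int.mod n w
  let bump : Int := if (if PySem.Int.mod base 2 = 0 then idx < r else w - r ≤ idx) then 1 else 0
  base + bump - th + 1

-- ===== PRECONDITION & SPEC =====
-- Pre_ excludes w ≤ 0, where A raises (ZeroDivisionError for w = 0, IndexError for w < 0).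
def Pre_solution (n : Int) (w : Int) (num : Int) : Prop := 1 ≤ w
instance (n : Int) (w : Int) (num : Int) : Decidable (Pre_solution n w num) := by unfold Pre_solution; infer_instance
def pvWitness_solution : Int × Int × Int := (13, 3, 7)

def Spec_solution (n : Int) (w : Int) (num : Int) (out : Int) : Prop := out = solution_alt n w num
instance (n : Int) (w : Int) (num : Int) (out : Int) : Decidable (Spec_solution n w num out) := by unfold Spec_solution; infer_instance

-- ===== CLAIM (what is proved, stated in full; the proofs are below) =====
def Claim_equal_solution : Prop := ∀ (n : Int) (w : Int) (num : Int), Dom_solution n w num → Pre_solution n w num → Spec_solution n w num (solution n w num)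

-- ===== LEMMAS AND PROOFS =====

-- ceiling division -((-a) // w) equals a//w, plus 1 exactly when w does not divide a
lemma th_closed (w num : Int) (hw : 0 < w) :
    -(PySem.Int.floordiv (-num) w)
      = (if PySem.Int.mod num w = 0 then PySem.Int.floordiv num w + 1 - 1 else PySem.Int.floordiv num w + 1) := by
  rw [PySem.Int.neg_floordiv_neg_eq_iff_of_pos (b := w) (hb := hw)]
  rw [PySem.Int.mod_eq_emod_of_pos hw, PySem.Int.floordiv_eq_ediv_of_pos hw]
  have e := Int.mul_ediv_add_emod num w
  have h0 := Int.emod_nonneg num (by omega : w ≠ 0)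
  have h1 := Int.emod_lt_of_pos num hw
  have e' : num / w * w + num % w = num := by rw [mul_comm w (num / w)] at e; exact e
  split_ifs with h
  · constructor
    · have hr : (num / w + 1 - 1 - 1) * w = num / w * w - w := by ring
      rw [hr]; linarith
    · have hr : (num / w + 1 - 1) * w = num / w * w := by ring
      rw [hr]; linarith
  · have hpos : 0 < num % w := lt_of_le_of_ne h0 (Ne.symm h)
    constructor
    · have hr : (num / w + 1 - 1) * w = num / w * w := by ring
      rw [hr]; linarith
    · have hr : (num / w + 1) * w = num / w * w + w := by ring
      rw [hr]; linarith

-- ascending increment loop: element j gains 1 iff c ≤ j < c + length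
lemma foldl_inc_asc (l : List Int) (xs : List Int) (c : Int) (j : Nat) (hj : j < xs.length)
    (hc0 : 0 ≤ c) (hcl : c + l.length ≤ (xs.length : Int)) :
    ((l.foldl
        (fun (s : List Int × Int) _ =>
          (PySem.List.pySetD s.1 s.2 (PySem.List.pyGetD s.1 s.2 0 + 1), s.2 + 1))
        (xs, c)).1).getD j 0
      = xs.getD j 0 + (if c ≤ (j : Int) ∧ (j : Int) < c + l.length then 1 else 0) := by
  induction l generalizing xs c with
  | nil =>
    have h0 : ¬ (c ≤ (j : Int) ∧ (j : Int) < c + (([] : List Int).length : Int)) := by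
      simp only [List.length_nil]; push_cast; omega
    simp
  | cons a l ih =>
    have hcu : c < (xs.length : Int) := by simp only [List.length_cons] at hcl; push_cast at hcl; omega
    simp only [List.foldl_cons]
    rw [PySem.List.pySetD_of_nonneg _ _ hc0,
        PySem.List.pyGetD_eq_getElem xs 0 hc0 hcu]
    rw [ih _ _ (by simpa using hj) (by omega)
          (by simp only [List.length_set, List.length_cons] at hcl ⊢; push_cast at hcl ⊢; omega)]
    rw [List.getD_eq_getElem?_getD, List.getD_eq_getElem?_getD, List.getElem?_set]
    by_cases hcj : c.toNat = j
    · have hji : (j : Int) = c := by omega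
      rw [if_pos hcj, if_pos (by omega : c.toNat < xs.length)]
      have hwin : c ≤ (j : Int) ∧ (j : Int) < c + ((a :: l).length : Int) := by
        simp only [List.length_cons]; push_cast; omega
      rw [if_pos hwin]
      have hnot : ¬ (c + 1 ≤ (j : Int) ∧ (j : Int) < c + 1 + (l.length : Int)) := by omega
      rw [if_neg hnot]
      subst hcj
      simp [List.getElem?_eq_getElem (show c.toNat < xs.length by omega)]
    · rw [if_neg hcj]
      have hji : ¬ (j : Int) = c := by omega
      have hiff : (c + 1 ≤ (j : Int) ∧ (j : Int) < c + 1 + (l.length : Int)) ↔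
          (c ≤ (j : Int) ∧ (j : Int) < c + ((a :: l).length : Int)) := by
        simp only [List.length_cons]; push_cast; omega
      rw [if_congr hiff rfl rfl]

-- descending increment loop: element j gains 1 iff c - length < j ≤ c
lemma foldl_inc_desc (l : List Int) (xs : List Int) (c : Int) (j : Nat) (hj : j < xs.length)
    (hc : (l.length : Int) ≤ c + 1) (hcu : c < (xs.length : Int)) :
    ((l.foldl
        (fun (s : List Int × Int) _ =>
          (PySem.List.pySetD s.1 s.2 (PySem.List.pyGetD s.1 s.2 0 + 1), s.2 - 1))
        (xs, c)).1).getD j 0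
      = xs.getD j 0 + (if c - l.length < (j : Int) ∧ (j : Int) ≤ c then 1 else 0) := by
  induction l generalizing xs c with
  | nil =>
    have h0 : ¬ (c - (([] : List Int).length : Int) < (j : Int) ∧ (j : Int) ≤ c) := by
      simp only [List.length_nil]; push_cast; omega
    simp
  | cons a l ih =>
    have hc0 : 0 ≤ c := by simp at hc; omega
    simp only [List.foldl_cons]
    rw [PySem.List.pySetD_of_nonneg _ _ hc0,
        PySem.List.pyGetD_eq_getElem xs 0 hc0 hcu]
    rw [ih _ _ (by simpa using hj) (by simp at hc ⊢; omega)
          (by simp [List.length_set]; omega)]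
    rw [List.getD_eq_getElem?_getD, List.getD_eq_getElem?_getD, List.getElem?_set]
    by_cases hcj : c.toNat = j
    · have hji : (j : Int) = c := by omega
      rw [if_pos hcj, if_pos (by omega : c.toNat < xs.length)]
      have hwin : c - ((a :: l).length : Int) < (j : Int) ∧ (j : Int) ≤ c := by
        simp only [List.length_cons]; push_cast; simp only [List.length_cons] at hc; omega
      rw [if_pos hwin]
      have hnot : ¬ (c - 1 - (l.length : Int) < (j : Int) ∧ (j : Int) ≤ c - 1) := by omega
      rw [if_neg hnot]
      subst hcj
      simp [List.getElem?_eq_getElem (show c.toNat < xs.length by omega)]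
    · rw [if_neg hcj]
      have hji : ¬ (j : Int) = c := by omega
      have hiff : (c - 1 - (l.length : Int) < (j : Int) ∧ (j : Int) ≤ c - 1) ↔ (c - ((a :: l).length : Int) < (j : Int) ∧ (j : Int) ≤ c) := by
        simp only [List.length_cons]; push_cast; omega
      rw [if_congr hiff rfl rfl]

-- both increment loops preserve the list length
lemma asc_len (l : List Int) (xs : List Int) (c : Int) :
    ((l.foldl
        (fun (s : List Int × Int) _ =>
          (PySem.List.pySetD s.1 s.2 (PySem.List.pyGetD s.1 s.2 0 + 1), s.2 + 1))
        (xs, c)).1).length = xs.length := by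
  induction l generalizing xs c with
  | nil => rfl
  | cons a l ih => simp only [List.foldl_cons]; rw [ih]; exact PySem.List.length_pySetD _ _ _

lemma desc_len (l : List Int) (xs : List Int) (c : Int) :
    ((l.foldl
        (fun (s : List Int × Int) _ =>
          (PySem.List.pySetD s.1 s.2 (PySem.List.pyGetD s.1 s.2 0 + 1), s.2 - 1))
        (xs, c)).1).length = xs.length := by
  induction l generalizing xs c with
  | nil => rfl
  | cons a l ih => simp only [List.foldl_cons]; rw [ih]; exact PySem.List.length_pySetD _ _ _

-- key evaluation: the height of the target column computed by A's list equals B's closed form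
lemma layer_value (n w : Int) (hw : 0 < w) (idx : Int) (h0 : 0 ≤ idx) (h1 : idx < w) :
    (let add_width := PySem.Int.mod n w
     let total_hight := PySem.Int.floordiv n w
     let layer : List Int := (PySem.List.pyRange 0 w 1).map (fun _ => total_hight)
     let layer :=
       if 0 < add_width then
         if PySem.Int.mod total_hight 2 = 0 then
           ((PySem.List.pyRange 0 add_width 1).foldl
             (fun (s : List Int × Int) _ =>
               (PySem.List.pySetD s.1 s.2 (PySem.List.pyGetD s.1 s.2 0 + 1), s.2 + 1))
             (layer, 0)).1
         else
           ((PySem.List.pyRange 0 add_width 1).foldl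
             (fun (s : List Int × Int) _ =>
               (PySem.List.pySetD s.1 s.2 (PySem.List.pyGetD s.1 s.2 0 + 1), s.2 - 1))
             (layer, w - 1)).1
       else layer
     PySem.List.pyGetD layer idx 0)
    = PySem.Int.floordiv n w +
        (if (if PySem.Int.mod (PySem.Int.floordiv n w) 2 = 0
              then idx < PySem.Int.mod n w
              else w - PySem.Int.mod n w ≤ idx) then 1 else 0) := by
  have hr0 : 0 ≤ PySem.Int.mod n w := PySem.Int.mod_nonneg n hw
  have hr1 : PySem.Int.mod n w < w := PySem.Int.mod_lt n hw
  set q := PySem.Int.floordiv n w with hq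
  set r := PySem.Int.mod n w with hrdef
  have hlay : ∀ j : Nat, (j : Int) < w →
      ((PySem.List.pyRange 0 w 1).map (fun _ => q)).getD j 0 = q := by
    intro j hj
    have := PySem.List.pyGetD_map_pyRange_of_nonneg (fun _ => q) w (j : Int) 0
      (by positivity) hj
    simpa using this
  have hlen : ((PySem.List.pyRange 0 w 1).map (fun _ => q)).length = w.toNat := by
    simp [PySem.List.length_pyRange_one]
  simp only []
  by_cases hr : 0 < r
  · rw [if_pos hr]
    by_cases hpar : PySem.Int.mod q 2 = 0
    · simp only [if_pos hpar]
      rw [PySem.List.pyGetD_eq_getElem _ 0 h0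
        (by rw [asc_len]; simp; omega)]
      rw [← List.getD_eq_getElem _ 0,
          foldl_inc_asc _ _ 0 idx.toNat (by simp; omega) le_rfl
            (by simp only [PySem.List.length_pyRange_one, hlen]; omega)]
      rw [hlay idx.toNat (by omega)]
      have hl : ((PySem.List.pyRange 0 r 1).length : Int) = r := by
        simp [PySem.List.length_pyRange_one]; omega
      rw [hl]
      by_cases hcmp : idx < r
      · rw [if_pos (by omega : (0:Int) ≤ (idx.toNat : Int) ∧ (idx.toNat : Int) < 0 + r), if_pos hcmp]
      · rw [if_neg (by omega : ¬ ((0:Int) ≤ (idx.toNat : Int) ∧ (idx.toNat : Int) < 0 + r)), if_neg hcmp]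
    · simp only [if_neg hpar]
      rw [PySem.List.pyGetD_eq_getElem _ 0 h0
        (by rw [desc_len]; simp; omega)]
      rw [← List.getD_eq_getElem _ 0,
          foldl_inc_desc _ _ (w - 1) idx.toNat (by simp; omega)
            (by simp only [PySem.List.length_pyRange_one]; omega)
            (by simp only [hlen]; omega)]
      rw [hlay idx.toNat (by omega)]
      have hl : ((PySem.List.pyRange 0 r 1).length : Int) = r := by
        simp [PySem.List.length_pyRange_one]; omega
      rw [hl]
      by_cases hcmp : w - r ≤ idx
      · rw [if_pos (by omega : w - 1 - r < (idx.toNat : Int) ∧ (idx.toNat : Int) ≤ w - 1),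
            if_pos hcmp]
      · rw [if_neg (by omega : ¬ (w - 1 - r < (idx.toNat : Int) ∧ (idx.toNat : Int) ≤ w - 1)),
            if_neg hcmp]
  · have hr' : r = 0 := by omega
    rw [if_neg hr]
    have := PySem.List.pyGetD_map_pyRange_of_nonneg (fun _ => q) w idx 0 h0 h1
    rw [this]
    have hc : ¬ (if PySem.Int.mod q 2 = 0 then idx < r else w - r ≤ idx) := by
      split_ifs <;> omega
    rw [if_neg hc]
    ring

-- ===== VERDICT (by name: the statement is the Claim_ definition above) =====
theorem solution_spec : Claim_equal_solution := by
  intro n w num _ hpre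
  have hw : 0 < w := hpre
  unfold Spec_solution solution solution_alt
  simp only []
  rw [th_closed w num hw]
  have hm0 : 0 ≤ PySem.Int.mod num w := PySem.Int.mod_nonneg num hw
  have hm1 : PySem.Int.mod num w < w := PySem.Int.mod_lt num hw
  set th := (if PySem.Int.mod num w = 0 then PySem.Int.floordiv num w + 1 - 1
             else PySem.Int.floordiv num w + 1) with hth
  set idx := (if PySem.Int.mod th 2 = 0
              then w - (if PySem.Int.mod num w = 0 then w else PySem.Int.mod num w)
              else (if PySem.Int.mod num w = 0 then w else PySem.Int.mod num w) - 1) with hidx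
  have h0 : 0 ≤ idx := by rw [hidx]; split_ifs <;> omega
  have h1 : idx < w := by rw [hidx]; split_ifs <;> omega
  have key := layer_value n w hw idx h0 h1
  simp only [] at key
  rw [key]
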